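-- pv_equiv track=rewrite | github.com/eMostyn/Project-Euler-Problems | problem 59/problem 59.py | compute
-- ===== SOURCE A (Python) =====
-- def checkValid(digit,testChar):
--     #Gets xor value of digit from message and current character being tested
--     xor = digit ^ testChar
--     #2 checks to see if the value is in the range of valid ascii characters
--     if 32 <= xor <= 93:
--         return True
--     elif 97 <= xor <= 122:
--         return True
--     #Not in valid region
--     return False
--
-- def compute(encrypted):
--     #Holds current key1 valids
--     key1 = []
--     #Goes through the alphabet
--     for a in range(97,123):
--         key1.append(a)
--         #Check every character which key1 must work on
--         for j in range(0,len(encrypted),3):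
--             #If its not valid then remove that character from the valid list and move to the next character
--             if checkValid(encrypted[j],a) == False:
--                 key1.remove(a)
--                 break;
--     #Same approach for key2 and key3
--     key2 = []
--     for b in range(97,123):
--         key2.append(b)
--         for k in range(1,len(encrypted),3):
--             if checkValid(encrypted[k],b) == False:
--                 key2.remove(b)
--                 break;
--     key3 = []
--     for c in range(97,123):
--         key3.append(c)
--         for l in range(2,len(encrypted),3):
--             if checkValid(encrypted[l],c) == False:
--                 key3.remove(c)
--                 break;
--
--     #For every section to use the found key one, aka every 3 chars
--     for i in range(0,len(encrypted),3):
--         #Use each character of the key on the corresponding character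
--         encrypted[i] = encrypted[i] ^ key1[0]
--         encrypted[i+1] = encrypted[i+1] ^ key2[0]
--         encrypted[i+2] = encrypted[i+2] ^ key3[0]
--     #Return the sum of each decrypted aswell as the decrypted message in plaintext
--     return sum(encrypted),convertMessage(encrypted)
--
-- def convertMessage(toConvert):
--     newMessage = ""
--     for i in range(0,len(toConvert)):
--       newMessage += (chr(toConvert[i]))
--     return newMessage
-- ===== SOURCE B (Python) =====
-- def compute(encrypted):
--     # One transposed sieve pass instead of three 26-candidate scans; same in-place
--     # decryption of `encrypted` (the argument is mutated, as in the original).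
--     cands = [set(range(97, 123)) for _ in range(3)]
--     for i, d in enumerate(encrypted):
--         cands[i % 3] = {a for a in cands[i % 3]
--                         if 32 <= (d ^ a) <= 93 or 97 <= (d ^ a) <= 122}
--     keys = [sorted(c)[0] for c in cands]
--     for i in range(0, len(encrypted), 3):
--         encrypted[i] ^= keys[0]
--         encrypted[i + 1] ^= keys[1]
--         encrypted[i + 2] ^= keys[2]
--     return sum(encrypted), ''.join(chr(c) for c in encrypted)
-- ===== Notes on version B (the rewrite author's own statement) =====
-- stated objective: simpler
-- what changed: A runs three separate 26-candidate loops, each rescanning every third character of the message per candidate with an early break; B keeps three candidate sets and makes a single transposed pass over the message, eliminating failing keys from the set for i%3, then takes the smallest survivor per offset.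
import Mathlib
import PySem

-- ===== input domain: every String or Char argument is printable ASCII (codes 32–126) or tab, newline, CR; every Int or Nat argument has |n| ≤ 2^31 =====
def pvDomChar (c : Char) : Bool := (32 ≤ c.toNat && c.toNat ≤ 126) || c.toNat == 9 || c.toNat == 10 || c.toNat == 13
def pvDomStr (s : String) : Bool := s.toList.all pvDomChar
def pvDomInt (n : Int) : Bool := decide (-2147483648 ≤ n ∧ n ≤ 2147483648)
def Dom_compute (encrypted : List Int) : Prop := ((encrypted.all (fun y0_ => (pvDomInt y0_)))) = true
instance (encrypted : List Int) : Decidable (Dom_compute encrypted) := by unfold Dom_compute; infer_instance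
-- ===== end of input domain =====

-- B replaces A's three 26-candidate offset scans by one transposed sieve pass over the
-- message (three candidate sets, one eliminating pass, smallest survivor per offset);
-- decryption and result are unchanged. A mutates its argument in place (B's Python does
-- the same); the equivalence proved here is about the RETURN value.


-- ===== PORT A =====

-- checkValid(digit, testChar): two range tests on digit ^ testChar
def checkValid (digit testChar : Int) : Bool :=
  let xor := PySem.Int.bxor digit testChar
  if 32 ≤ xor ∧ xor ≤ 93 then true
  else if 97 ≤ xor ∧ xor ≤ 122 then true
  else false

-- inner loop 'for j in range(start, len, 3): if checkValid(encrypted[j], a) == False: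
-- key.remove(a); break' ('a' was just appended, so remove? never fails; getD is a guard)
def keyScan (enc : List Int) (a : Int) (js : List Int) (key : List Int) : List Int :=
  match js with
  | [] => key
  | j :: js' =>
    if checkValid (PySem.List.pyGetD enc j 0) a = false then
      (PySem.List.remove? key a).getD key
    else keyScan enc a js' key

-- one of A's three identical key loops: 'for a in range(97,123): key.append(a); <inner scan>'
def buildKey (enc : List Int) (start : Int) : List Int :=
  (PySem.List.pyRange 97 123).foldl
    (fun key a => keyScan enc a (PySem.List.pyRange start (PySem.List.len enc) 3) (key ++ [a])) []

-- 'for i in range(0, len, 3): encrypted[i] ^= k1; encrypted[i+1] ^= k2; encrypted[i+2] ^= k3'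
-- (pyGetD-with-0 / .set are totality guards: out of range Python raises IndexError, outside Pre_)
def decLoopA (k1 k2 k3 : Int) (is : List Int) (enc : List Int) : List Int :=
  match is with
  | [] => enc
  | i :: is' =>
    let e1 := enc.set i.toNat (PySem.Int.bxor (PySem.List.pyGetD enc i 0) k1)
    let e2 := e1.set (i+1).toNat (PySem.Int.bxor (PySem.List.pyGetD e1 (i+1) 0) k2)
    let e3 := e2.set (i+2).toNat (PySem.Int.bxor (PySem.List.pyGetD e2 (i+2) 0) k3)
    decLoopA k1 k2 k3 is' e3

-- convertMessage: 'newMessage += chr(toConvert[i])'; chr is ported by hand as Char.ofNat,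
-- exact on valid code points (inside Pre_ every decrypted value lies in 32..122)
def convertMessage (toConvert : List Int) : String :=
  String.ofList ((PySem.List.pyRange 0 (PySem.List.len toConvert)).foldl
    (fun s i => s ++ [Char.ofNat (PySem.List.pyGetD toConvert i 0).toNat]) [])

def compute (encrypted : List Int) : Int × String :=
  let key1 := buildKey encrypted 0
  let key2 := buildKey encrypted 1
  let key3 := buildKey encrypted 2
  -- key1[0]/key2[0]/key3[0]: pyGetD-with-0 is a totality guard (Python: IndexError, outside Pre_)
  let dec := decLoopA (PySem.List.pyGetD key1 0 0) (PySem.List.pyGetD key2 0 0)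
      (PySem.List.pyGetD key3 0 0) (PySem.List.pyRange 0 (PySem.List.len encrypted) 3) encrypted
  (dec.sum, convertMessage dec)

-- ===== PORT B =====

-- the set comprehension '{a for a in c if 32 <= d^a <= 93 or 97 <= d^a <= 122}'
-- (its result is consumed only through sorted(), so set iteration order never matters)
def sieveB (d : Int) (c : PySem.Set Int) : PySem.Set Int :=
  c.filter (fun a => decide ((32 ≤ PySem.Int.bxor d a ∧ PySem.Int.bxor d a ≤ 93) ∨
                             (97 ≤ PySem.Int.bxor d a ∧ PySem.Int.bxor d a ≤ 122)))

-- Source B's decryption loop, with the keys kept as the list 'keys' (getD/set are totality guards)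
def decLoopB (keys : List Int) (is : List Int) (enc : List Int) : List Int :=
  match is with
  | [] => enc
  | i :: is' =>
    let e1 := enc.set i.toNat (PySem.Int.bxor (PySem.List.pyGetD enc i 0) (keys.getD 0 0))
    let e2 := e1.set (i+1).toNat (PySem.Int.bxor (PySem.List.pyGetD e1 (i+1) 0) (keys.getD 1 0))
    let e3 := e2.set (i+2).toNat (PySem.Int.bxor (PySem.List.pyGetD e2 (i+2) 0) (keys.getD 2 0))
    decLoopB keys is' e3

def compute_alt (encrypted : List Int) : Int × String :=
  let init : PySem.Set Int := PySem.Set.ofList (PySem.List.pyRange 97 123)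
  let cands := (PySem.List.enumerate encrypted).foldl
      (fun cs p => cs.modify (PySem.Int.mod p.1 3).toNat (sieveB p.2)) [init, init, init]
  -- 'sorted(c)[0]': pyGetD-with-0 is a totality guard (Python: IndexError, outside Pre_)
  let keys := cands.map (fun c => PySem.List.pyGetD (PySem.List.sorted c (fun x => x)) 0 0)
  let dec := decLoopB keys (PySem.List.pyRange 0 (PySem.List.len encrypted) 3) encrypted
  (dec.sum, String.ofList (dec.map (fun c => Char.ofNat c.toNat)))

-- ===== PRECONDITION & SPEC =====

def pvValid (d a : Int) : Bool :=
  decide ((32 ≤ PySem.Int.bxor d a ∧ PySem.Int.bxor d a ≤ 93) ∨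
          (97 ≤ PySem.Int.bxor d a ∧ PySem.Int.bxor d a ≤ 122))

-- exactly the inputs on which the Python A returns: the length is a multiple of 3 (else the
-- decryption loop's encrypted[i+1]/encrypted[i+2] raises IndexError) and for each of the
-- three offsets some lowercase key passes checkValid on every character at that offset
-- (else key1[0]/key2[0]/key3[0] raises IndexError)
def Pre_compute (encrypted : List Int) : Prop :=
  encrypted.length % 3 = 0 ∧
  ∀ r ∈ ([0, 1, 2] : List Int), ∃ a ∈ PySem.List.pyRange 97 123,
    ∀ p ∈ PySem.List.enumerate encrypted, PySem.Int.mod p.1 3 = r → pvValid p.2 a = true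
instance (encrypted : List Int) : Decidable (Pre_compute encrypted) := by
  unfold Pre_compute; infer_instance

def pvWitness_compute : List Int := [21, 10, 6]

def Spec_compute (encrypted : List Int) (out : Int × String) : Prop := out = compute_alt encrypted
instance (encrypted : List Int) (out : Int × String) : Decidable (Spec_compute encrypted out) := by unfold Spec_compute; infer_instance

-- ===== CLAIM (what is proved, stated in full; the proofs are below) =====
def Claim_equal_compute : Prop := ∀ (encrypted : List Int), Dom_compute encrypted → Pre_compute encrypted → Spec_compute encrypted (compute encrypted)

-- ===== LEMMAS AND PROOFS =====

lemma checkValid_eq_pvValid (d a : Int) : checkValid d a = pvValid d a := by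
  simp only [checkValid, pvValid]
  by_cases h1 : 32 ≤ PySem.Int.bxor d a ∧ PySem.Int.bxor d a ≤ 93 <;>
  by_cases h2 : 97 ≤ PySem.Int.bxor d a ∧ PySem.Int.bxor d a ≤ 122 <;>
  simp [h1, h2]

lemma keyScan_eq (enc : List Int) (a : Int) (js key : List Int) :
    keyScan enc a js key =
      if js.all (fun j => checkValid (PySem.List.pyGetD enc j 0) a) then key
      else (PySem.List.remove? key a).getD key := by
  induction js with
  | nil => simp [keyScan]
  | cons j js ih =>
    by_cases h : checkValid (PySem.List.pyGetD enc j 0) a = false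
    · simp [keyScan, h]
    · simp only [Bool.not_eq_false] at h
      simp [keyScan, h, ih]

lemma buildKey_foldl (enc : List Int) (js : List Int) (L key : List Int)
    (hd : ∀ a ∈ L, a ∉ key) (hn : L.Nodup) :
    L.foldl (fun key a => keyScan enc a js (key ++ [a])) key
      = key ++ L.filter (fun a => js.all (fun j => checkValid (PySem.List.pyGetD enc j 0) a)) := by
  induction L generalizing key with
  | nil => simp
  | cons a L ih =>
    have ha : a ∉ key := hd a (by simp)
    have hrem : (PySem.List.remove? (key ++ [a]) a).getD (key ++ [a]) = key := by
      rw [PySem.List.remove?_eq_some_erase _ a (by simp)]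
      simp [List.erase_append_right _ ha]
    rw [List.foldl_cons, keyScan_eq]
    rcases List.nodup_cons.1 hn with ⟨haL, hnL⟩
    by_cases hall : (js.all fun j => checkValid (PySem.List.pyGetD enc j 0) a) = true
    · rw [if_pos hall, ih (key ++ [a])
        (by intro b hb; simp only [List.mem_append, List.mem_singleton]
            rintro (h | rfl); exact hd b (by simp [hb]) h; exact haL hb) hnL]
      simp [hall]
    · rw [if_neg hall, hrem, ih key (fun b hb => hd b (by simp [hb])) hnL]
      simp [hall]

lemma buildKey_eq (enc : List Int) (start : Int) :
    buildKey enc start = (PySem.List.pyRange 97 123).filter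
      (fun a => (PySem.List.pyRange start (PySem.List.len enc) 3).all
        (fun j => checkValid (PySem.List.pyGetD enc j 0) a)) := by
  unfold buildKey
  rw [buildKey_foldl enc _ _ [] (by simp) (PySem.List.nodup_pyRange_one 97 123)]
  simp

def sieveF (r : Int) (c : List Int) (l : List (Int × Int)) : List Int :=
  l.foldl (fun c p => if PySem.Int.mod p.1 3 = r then sieveB p.2 c else c) c

lemma cands_foldl (l : List (Int × Int)) (c0 c1 c2 : List Int)
    (hpos : ∀ p ∈ l, 0 ≤ p.1) :
    l.foldl (fun cs p => cs.modify (PySem.Int.mod p.1 3).toNat (sieveB p.2)) [c0, c1, c2]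
      = [sieveF 0 c0 l, sieveF 1 c1 l, sieveF 2 c2 l] := by
  induction l generalizing c0 c1 c2 with
  | nil => simp [sieveF]
  | cons p l ih =>
    have h0 : 0 ≤ PySem.Int.mod p.1 3 := PySem.Int.mod_nonneg p.1 (by omega)
    have h3 : PySem.Int.mod p.1 3 < 3 := PySem.Int.mod_lt p.1 (by omega)
    have hl : ∀ q ∈ l, 0 ≤ q.1 := fun q hq => hpos q (by simp [hq])
    have e : ∀ r c, sieveF r c (p :: l)
        = sieveF r (if PySem.Int.mod p.1 3 = r then sieveB p.2 c else c) l := fun r c => rfl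
    have hm : PySem.Int.mod p.1 3 = 0 ∨ PySem.Int.mod p.1 3 = 1 ∨ PySem.Int.mod p.1 3 = 2 := by omega
    rw [List.foldl_cons, e, e, e]
    rcases hm with hm | hm | hm
    · rw [show (PySem.Int.mod p.1 3).toNat = 0 by rw [hm]; rfl,
          if_pos hm, if_neg (by omega), if_neg (by omega),
          show List.modify [c0,c1,c2] 0 (sieveB p.2) = [sieveB p.2 c0, c1, c2] from rfl]
      exact ih _ _ _ hl
    · rw [show (PySem.Int.mod p.1 3).toNat = 1 by rw [hm]; rfl,
          if_neg (by omega), if_pos hm, if_neg (by omega),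
          show List.modify [c0,c1,c2] 1 (sieveB p.2) = [c0, sieveB p.2 c1, c2] from rfl]
      exact ih _ _ _ hl
    · rw [show (PySem.Int.mod p.1 3).toNat = 2 by rw [hm]; rfl,
          if_neg (by omega), if_neg (by omega), if_pos hm,
          show List.modify [c0,c1,c2] 2 (sieveB p.2) = [c0, c1, sieveB p.2 c2] from rfl]
      exact ih _ _ _ hl

lemma sieveF_eq_filter (r : Int) (c : List Int) (l : List (Int × Int)) :
    sieveF r c l = c.filter
      (fun a => l.all (fun p => !decide (PySem.Int.mod p.1 3 = r) || pvValid p.2 a)) := by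
  induction l generalizing c with
  | nil => simp [sieveF]
  | cons p l ih =>
    have e : sieveF r c (p :: l)
        = sieveF r (if PySem.Int.mod p.1 3 = r then sieveB p.2 c else c) l := rfl
    rw [e]
    by_cases hm : PySem.Int.mod p.1 3 = r
    · rw [if_pos hm, ih]
      show (List.filter _ (List.filter _ c)) = _
      rw [List.filter_filter]
      apply List.filter_congr
      intro a _
      have hd : decide (PySem.Int.mod p.1 3 = r) = true := by rw [hm]; exact decide_eq_true rfl
      simp only [List.all_cons, pvValid, hd, Bool.not_true, Bool.false_or]
      rw [Bool.and_comm]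
    · rw [if_neg hm, ih]
      apply List.filter_congr
      intro a _
      have hd : decide (PySem.Int.mod p.1 3 = r) = false := decide_eq_false hm
      simp only [List.all_cons, hd, Bool.not_false, Bool.true_or, Bool.true_and]

lemma pred_congr (enc : List Int) (r : Int) (hr : r = 0 ∨ r = 1 ∨ r = 2) (a : Int) :
    (PySem.List.pyRange r (PySem.List.len enc) 3).all
        (fun j => checkValid (PySem.List.pyGetD enc j 0) a)
      = (PySem.List.enumerate enc).all
        (fun p => !decide (PySem.Int.mod p.1 3 = r) || pvValid p.2 a) := by
  rw [PySem.List.enumerate_eq_map_pyRange enc 0, Bool.eq_iff_iff]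
  simp only [List.all_eq_true, List.mem_map, checkValid_eq_pvValid]
  constructor
  · rintro h p ⟨j, hj, rfl⟩
    rw [PySem.List.mem_pyRange_one] at hj
    by_cases hm : PySem.Int.mod j 3 = r
    · have hj3 : j ∈ PySem.List.pyRange r (PySem.List.len enc) 3 := by
        rw [PySem.List.mem_pyRange_iff_of_pos (by omega)]
        rw [PySem.Int.mod_eq_emod_of_pos (by omega)] at hm
        refine ⟨by omega, hj.2, by omega⟩
      simp [h j hj3]
    · rw [PySem.Int.mod_eq_emod_of_pos (by omega)] at hm
      simp [hm]
  · intro h j hj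
    rw [PySem.List.mem_pyRange_iff_of_pos (by omega)] at hj
    obtain ⟨h1, h2, h3⟩ := hj
    have hj1 : j ∈ PySem.List.pyRange 0 (PySem.List.len enc) := by
      rw [PySem.List.mem_pyRange_one]; omega
    have := h (j, PySem.List.pyGetD enc j 0) ⟨j, hj1, rfl⟩
    have hm : j % 3 = r := by omega
    rcases (by simpa using this : ¬ j % 3 = r ∨ pvValid (PySem.List.pyGetD enc j 0) a = true) with hbad | hv
    · exact absurd hm hbad
    · exact hv

lemma key_eq (enc : List Int) (r : Int) (hr : r = 0 ∨ r = 1 ∨ r = 2) :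
    PySem.List.pyGetD (buildKey enc r) 0 0
      = PySem.List.pyGetD (PySem.List.sorted
          (sieveF r (PySem.Set.ofList (PySem.List.pyRange 97 123)) (PySem.List.enumerate enc))
          (fun x => x)) 0 0 := by
  rw [buildKey_eq, sieveF_eq_filter,
      show PySem.Set.ofList (PySem.List.pyRange 97 123) = PySem.List.pyRange 97 123 from by decide]
  rw [List.filter_congr (fun a _ => pred_congr enc r hr a)]
  rw [PySem.List.sorted_eq_self_of_pairwise _ _
    (((PySem.List.pairwise_lt_pyRange_one 97 123).filter _).imp (fun h => le_of_lt h))]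

lemma decLoop_eq (k1 k2 k3 : Int) (is enc : List Int) :
    decLoopA k1 k2 k3 is enc = decLoopB [k1, k2, k3] is enc := by
  induction is generalizing enc with
  | nil => rfl
  | cons i is ih => simp [decLoopA, decLoopB, ih]

lemma convertMessage_eq (dec : List Int) :
    convertMessage dec = String.ofList (dec.map (fun c => Char.ofNat c.toNat)) := by
  unfold convertMessage
  rw [PySem.List.foldl_append_singleton_eq_map (fun i => Char.ofNat (PySem.List.pyGetD dec i 0).toNat)]
  rw [show (fun i => Char.ofNat (PySem.List.pyGetD dec i 0).toNat)
        = (fun c : Int => Char.ofNat c.toNat) ∘ (fun j => PySem.List.pyGetD dec j 0) from rfl,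
      ← List.map_map, PySem.List.map_pyGetD_pyRange_zero]
  simp

-- ===== VERDICT (by name: the statement is the Claim_ definition above) =====
theorem compute_spec : Claim_equal_compute := by
  intro enc hdom hpre
  simp only [Spec_compute, compute, compute_alt]
  have hpos : ∀ p ∈ PySem.List.enumerate enc, 0 ≤ p.1 := by
    intro p hp
    rcases (PySem.List.mem_enumerate_iff _ _ _).1 hp with ⟨k, hk, rfl⟩
    simp
  rw [cands_foldl _ _ _ _ hpos]
  simp only [List.map_cons, List.map_nil]
  rw [decLoop_eq, convertMessage_eq,
      key_eq enc 0 (by omega), key_eq enc 1 (by omega), key_eq enc 2 (by omega)]
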